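-- pv_equiv track=rewrite | github.com/Arsen1302/Code-copy-detector | TestData/solutions/problem_1519_2_1.py | solution_1519_2_2
-- ===== SOURCE A (Python) =====
-- def solution_1519_2_2(atTheBeginning,string,pattern):
--
--     let_ONE=0
--     let_TWO=0
--     if not atTheBeginning:
--         let_TWO=1
--     for index in range(len(string)-1,-1,-1):
--         if string[index]==pattern[0]:
--             let_ONE+=let_TWO
--         if string[index]==pattern[1]:
--             let_TWO+=1
--     if atTheBeginning:
--         let_ONE+=let_TWO
--     return let_ONE
-- ===== SOURCE B (Python) =====
-- def solution_1519_2_2(atTheBeginning, string, pattern):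
--     # Staged passes over an augmented string: materialize the virtual boundary
--     # character (leading pattern[0] when atTheBeginning, trailing pattern[1]
--     # otherwise), build a prefix-count array of pattern[0]'s, then sum the
--     # prefix counts at every pattern[1] position.
--     if not string:
--         return 0
--     t = pattern[0] + string if atTheBeginning else string + pattern[1]
--     pre = [0]
--     for c in t:
--         pre.append(pre[-1] + (c == pattern[0]))
--     return sum(pre[j] for j, c in enumerate(t) if c == pattern[1])
-- ===== Notes on version B (the rewrite author's own statement) =====
-- stated objective: alternative
-- what changed: Replaced A's single backward scan with two running counters by staged forward passes over an augmented string (the virtual boundary character made explicit): first build a prefix-count array of pattern[0] occurrences, then sum its entries at every pattern[1] position.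
import Mathlib
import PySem

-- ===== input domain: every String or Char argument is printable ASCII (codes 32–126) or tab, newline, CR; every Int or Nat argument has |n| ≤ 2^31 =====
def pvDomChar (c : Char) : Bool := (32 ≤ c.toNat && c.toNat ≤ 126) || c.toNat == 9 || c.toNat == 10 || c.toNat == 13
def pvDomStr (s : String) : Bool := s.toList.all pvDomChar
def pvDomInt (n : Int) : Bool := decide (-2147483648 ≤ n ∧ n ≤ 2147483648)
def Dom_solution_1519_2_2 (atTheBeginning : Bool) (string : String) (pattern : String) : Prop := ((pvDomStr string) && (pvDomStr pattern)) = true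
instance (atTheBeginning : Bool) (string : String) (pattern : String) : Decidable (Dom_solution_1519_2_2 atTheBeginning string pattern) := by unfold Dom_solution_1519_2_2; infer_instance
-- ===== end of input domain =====

-- B replaces A's backward scan with running counters by staged forward passes
-- over an augmented string (the virtual boundary character made explicit):
-- a prefix-count array of pattern[0]'s, then a sum of its entries at pattern[1]
-- positions; same result, different decomposition (objective: alternative).

-- ===== PORT A =====
-- A's loop over string[len-1..0]: state (let_ONE, let_TWO), add-then-increment.
def solAloop (p0 p1 : Char) : List Char → Int × Int → Int × Int
  | [], st => st
  | c :: rest, (one, two) =>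
      solAloop p0 p1 rest
        ((if c = p0 then one + two else one), (if c = p1 then two + 1 else two))

def solution_1519_2_2 (atTheBeginning : Bool) (string : String) (pattern : String) : Int :=
  -- pattern[0]/pattern[1]: under Pre_ these exist whenever the loop runs; the
  -- defaults are only reachable outside Pre_ (where Python raises IndexError)
  let p0 := pattern.toList.getD 0 ' '
  let p1 := pattern.toList.getD 1 ' '
  let two0 : Int := if atTheBeginning then 0 else 1
  let st := solAloop p0 p1 string.toList.reverse (0, two0)
  if atTheBeginning then st.1 + st.2 else st.1

-- ===== PORT B =====
-- pre = [0]; for c in t: pre.append(pre[-1] + (c == pattern[0]))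
def solBpre (p0 : Char) (acc : Int) : List Char → List Int
  | [] => [acc]
  | c :: rest => acc :: solBpre p0 (acc + (if c = p0 then 1 else 0)) rest

-- sum(pre[j] for j, c in enumerate(t) if c == pattern[1])
def solBsum2 (p1 : Char) : List Char → List Int → Int
  | c :: rest, v :: vs => (if c = p1 then v else 0) + solBsum2 p1 rest vs
  | _, _ => 0

def solution_1519_2_2_alt (atTheBeginning : Bool) (string : String) (pattern : String) : Int :=
  let cs := string.toList
  if cs = [] then 0
  else
    let p0 := pattern.toList.getD 0 ' '
    let p1 := pattern.toList.getD 1 ' '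
    let t := if atTheBeginning then p0 :: cs else cs ++ [p1]
    solBsum2 p1 t (solBpre p0 0 t)

-- ===== PRECONDITION & SPEC =====
-- Pre_ excludes exactly the inputs where Python raises IndexError: a nonempty
-- string with a pattern of fewer than 2 characters (both A and B index pattern there).
def Pre_solution_1519_2_2 (atTheBeginning : Bool) (string : String) (pattern : String) : Prop :=
  string = "" ∨ 2 ≤ pattern.length
instance (atTheBeginning : Bool) (string : String) (pattern : String) : Decidable (Pre_solution_1519_2_2 atTheBeginning string pattern) := by unfold Pre_solution_1519_2_2; infer_instance

def pvWitness_solution_1519_2_2 : Bool × String × String := (true, "abab", "ab")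

def Spec_solution_1519_2_2 (atTheBeginning : Bool) (string : String) (pattern : String) (out : Int) : Prop := out = solution_1519_2_2_alt atTheBeginning string pattern
instance (atTheBeginning : Bool) (string : String) (pattern : String) (out : Int) : Decidable (Spec_solution_1519_2_2 atTheBeginning string pattern out) := by unfold Spec_solution_1519_2_2; infer_instance

-- ===== CLAIM (what is proved, stated in full; the proofs are below) =====
def Claim_equal_solution_1519_2_2 : Prop := ∀ (atTheBeginning : Bool) (string : String) (pattern : String), Dom_solution_1519_2_2 atTheBeginning string pattern → Pre_solution_1519_2_2 atTheBeginning string pattern → Spec_solution_1519_2_2 atTheBeginning string pattern (solution_1519_2_2 atTheBeginning string pattern)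

-- ===== LEMMAS AND PROOFS =====

-- number of occurrences of p in l, as an Int
def cntC (p : Char) : List Char → Int
  | [] => 0
  | c :: rest => (if c = p then 1 else 0) + cntC p rest

-- pairs p0-before-p1, counted per p0 occurrence (suffix form)
def solBsum (p0 p1 : Char) : List Char → Int
  | [] => 0
  | c :: rest => (if c = p0 then cntC p1 rest else 0) + solBsum p0 p1 rest

lemma solBsum2_pre (p0 p1 : Char) (t : List Char) :
    ∀ a : Int, solBsum2 p1 t (solBpre p0 a t) =
      solBsum p0 p1 t + a * cntC p1 t := by
  induction t with
  | nil => intro a; simp [solBsum2, solBpre, solBsum, cntC]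
  | cons c rest ih =>
      intro a
      simp only [solBsum2, solBpre, solBsum, cntC, ih]
      split_ifs <;> ring

-- pairs counted by the backward scan: p0 at position i, p1 at some position j < i
def pairsRev (p0 p1 : Char) : List Char → Int
  | [] => 0
  | c :: rest => (if c = p1 then cntC p0 rest else 0) + pairsRev p0 p1 rest

lemma cntC_append (p : Char) (xs ys : List Char) :
    cntC p (xs ++ ys) = cntC p xs + cntC p ys := by
  induction xs with
  | nil => simp [cntC]
  | cons x xs ih => simp [cntC, ih]; ring

lemma cntC_reverse (p : Char) (l : List Char) : cntC p l.reverse = cntC p l := by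
  induction l with
  | nil => rfl
  | cons c rest ih => simp [cntC, cntC_append, ih]; ring

lemma pairsRev_append_singleton (p0 p1 c : Char) (xs : List Char) :
    pairsRev p0 p1 (xs ++ [c]) =
      pairsRev p0 p1 xs + (if c = p0 then cntC p1 xs else 0) := by
  induction xs with
  | nil => simp [pairsRev, cntC]
  | cons x xs ih =>
      simp only [List.cons_append, pairsRev, ih, cntC_append, cntC]
      split_ifs <;> ring

lemma pairsRev_reverse (p0 p1 : Char) (l : List Char) :
    pairsRev p0 p1 l.reverse = solBsum p0 p1 l := by
  induction l with
  | nil => rfl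
  | cons c rest ih =>
      simp only [List.reverse_cons, pairsRev_append_singleton, ih, solBsum,
        cntC_reverse]
      ring

lemma solBsum_append_singleton (p0 p1 c : Char) (xs : List Char) :
    solBsum p0 p1 (xs ++ [c]) =
      solBsum p0 p1 xs + (if c = p1 then cntC p0 xs else 0) := by
  induction xs with
  | nil => simp [solBsum, cntC]
  | cons x xs ih =>
      simp only [List.cons_append, solBsum, ih, cntC_append, cntC]
      split_ifs <;> ring

lemma solAloop_spec (p0 p1 : Char) (m : List Char) :
    ∀ one two : Int, solAloop p0 p1 m (one, two) =
      (one + pairsRev p0 p1 m + two * cntC p0 m, two + cntC p1 m) := by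
  induction m with
  | nil => intro one two; simp [solAloop, pairsRev, cntC]
  | cons c rest ih =>
      intro one two
      simp only [solAloop, ih, pairsRev, cntC, Prod.mk.injEq]
      split_ifs <;> exact ⟨by ring, by ring⟩

lemma ports_agree (atTheBeginning : Bool) (string pattern : String) :
    solution_1519_2_2 atTheBeginning string pattern =
      solution_1519_2_2_alt atTheBeginning string pattern := by
  unfold solution_1519_2_2 solution_1519_2_2_alt
  by_cases h : string.toList = []
  · cases atTheBeginning <;>
      simp [h, solAloop]
  · simp only [h, solAloop_spec]
    cases atTheBeginning <;>
      simp [solBsum2_pre, solBsum, solBsum_append_singleton, pairsRev_reverse,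
        cntC_reverse] <;>
      omega

-- ===== VERDICT (by name: the statement is the Claim_ definition above) =====
theorem solution_1519_2_2_spec : Claim_equal_solution_1519_2_2 := by
  intro a s p _ _
  exact ports_agree a s p
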